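-- pv_equiv track=rewrite | github.com/kaffadu/scripture-detector | app/src/scripture_detector.py | detect_version_change
-- ===== SOURCE A (Python) =====
-- from typing import List, Optional, Tuple
--
-- def detect_version_change(text: str) -> Optional[str]:
--     """Detect if speaker requests a different Bible version"""
--     text_lower = text.lower()
--     version_keywords = ["version", "translation", "bible"]
--
--     for keyword in version_keywords:
--         if keyword in text_lower:
--             # Look for version names
--             words = text_lower.split()
--             for i, word in enumerate(words):
--                 if word in ["nkjv", "kjv", "niv", "esv", "nasb", "nlt", "amp", "msg"]:
--                     return word.upper()
--                 elif word == "version" and i > 0: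
--                     # Check previous word for version type
--                     prev_word = words[i-1].upper()
--                     if len(prev_word) <= 5:  # Likely version abbreviation
--                         return prev_word
--     return None
-- ===== SOURCE B (Python) =====
-- from typing import Optional
--
-- ABBREVIATIONS = {"nkjv", "kjv", "niv", "esv", "nasb", "nlt", "amp", "msg"}
--
--
-- def detect_version_change(text: str) -> Optional[str]:
--     """Detect if speaker requests a different Bible version"""
--     text_lower = text.lower()
--     if not any(kw in text_lower for kw in ("version", "translation", "bible")):
--         return None
--     words = text_lower.split()
--     # Stage 1: first abbreviation occurrence (index and word), if any.
--     abbr = next(((i, w) for i, w in enumerate(words) if w in ABBREVIATIONS), None)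
--     # Stage 2: first "<short word> version" occurrence, if any.
--     ver = next((i for i, w in enumerate(words)
--                 if w == "version" and i > 0 and len(words[i - 1]) <= 5), None)
--     # Stage 3: whichever occurs earlier in the sentence wins (indices never tie).
--     if abbr is not None and (ver is None or abbr[0] < ver):
--         return abbr[1].upper()
--     if ver is not None:
--         return words[ver - 1].upper()
--     return None
-- ===== Notes on version B (the rewrite author's own statement) =====
-- stated objective: alternative
-- what changed: Replaces A's nested early-return scan (outer keyword loop, inner enumerate loop mixing both match rules) by a staged select: a single any() guard, two independent searches - the first abbreviation hit and the first short-word-before-trigger hit - and a final comparison of the two hit indices to pick whichever occurs earlier in the sentence.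
import Mathlib
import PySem

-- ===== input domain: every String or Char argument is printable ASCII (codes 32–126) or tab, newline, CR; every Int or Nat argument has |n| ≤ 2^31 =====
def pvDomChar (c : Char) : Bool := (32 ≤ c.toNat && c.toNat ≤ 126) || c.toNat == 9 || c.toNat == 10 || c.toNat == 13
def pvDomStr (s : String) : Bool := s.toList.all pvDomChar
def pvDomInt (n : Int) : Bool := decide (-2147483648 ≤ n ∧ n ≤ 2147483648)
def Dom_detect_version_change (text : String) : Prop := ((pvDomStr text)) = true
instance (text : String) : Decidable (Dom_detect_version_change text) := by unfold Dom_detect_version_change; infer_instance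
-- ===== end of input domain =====

-- B replaces A's nested early-return scan by a staged select: a single any() guard, two
-- independent first-hit searches, then a comparison of the two hit indices (objective: alternative).

-- ===== PORT A =====
def pvAbbrevsA : List String := ["nkjv", "kjv", "niv", "esv", "nasb", "nlt", "amp", "msg"]

-- A's inner 'for i, word in enumerate(words)' loop
def pvInnerA (words : List String) : List (Int × String) → Option String
  | [] => none
  | (i, word) :: rest =>
    if pvAbbrevsA.contains word then some (PySem.Str.upper word)
    else if word == "version" && decide (0 < i) then
      -- words[i-1]: always in range here since 0 < i < len words, so pyGetD is exact
      let prev_word := PySem.Str.upper (PySem.List.pyGetD words (i - 1) "")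
      if PySem.Str.len prev_word ≤ 5 then some prev_word
      else pvInnerA words rest
    else pvInnerA words rest

-- A's outer 'for keyword in version_keywords' loop
def pvOuterA (text_lower : String) : List String → Option String
  | [] => none
  | kw :: rest =>
    if PySem.Str.isIn kw text_lower then
      match pvInnerA (PySem.Str.split₀ text_lower)
              (PySem.List.enumerate (PySem.Str.split₀ text_lower)) with
      | some r => some r
      | none => pvOuterA text_lower rest
    else pvOuterA text_lower rest

def detect_version_change (text : String) : Option String :=
  let text_lower := PySem.Str.lower text
  pvOuterA text_lower ["version", "translation", "bible"]

-- ===== PORT B =====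
def pvAbbrevSetB : PySem.Set String :=
  PySem.Set.ofList ["nkjv", "kjv", "niv", "esv", "nasb", "nlt", "amp", "msg"]

-- the two generator predicates of Source B's next(...) searches
def pvFA (p : Int × String) : Bool := PySem.Set.contains pvAbbrevSetB p.2

def pvFV (words : List String) (p : Int × String) : Bool :=
  p.2 == "version" && decide (0 < p.1)
    && decide (PySem.Str.len (PySem.List.pyGetD words (p.1 - 1) "") ≤ 5)

def detect_version_change_alt (text : String) : Option String :=
  let text_lower := PySem.Str.lower text
  if ["version", "translation", "bible"].any (fun kw => PySem.Str.isIn kw text_lower) then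
    let words := PySem.Str.split₀ text_lower
    -- next(((i, w) for i, w in enumerate(words) if w in ABBREVIATIONS), None)
    let abbr := ((PySem.List.enumerate words).filter pvFA).head?
    -- next((i for i, w in enumerate(words) if w == "version" and i > 0 and len(words[i-1]) <= 5), None)
    let ver := (((PySem.List.enumerate words).filter (pvFV words)).map Prod.fst).head?
    match abbr, ver with
    | some (_, w), none => some (PySem.Str.upper w)
    | some (a, w), some v =>
        if a < v then some (PySem.Str.upper w)
        else some (PySem.Str.upper (PySem.List.pyGetD words (v - 1) ""))
    | none, some v => some (PySem.Str.upper (PySem.List.pyGetD words (v - 1) ""))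
    | none, none => none
  else none

-- ===== PRECONDITION & SPEC =====
def Spec_detect_version_change (text : String) (out : Option String) : Prop := out = detect_version_change_alt text
instance (text : String) (out : Option String) : Decidable (Spec_detect_version_change text out) := by unfold Spec_detect_version_change; infer_instance

-- ===== CLAIM (what is proved, stated in full; the proofs are below) =====
def Claim_equal_detect_version_change : Prop := ∀ (text : String), Dom_detect_version_change text → Spec_detect_version_change text (detect_version_change text)

-- ===== LEMMAS AND PROOFS =====

theorem pv_len_upper (s : String) : PySem.Str.len (PySem.Str.upper s) = PySem.Str.len s := by
  simp [PySem.Str.len_eq, PySem.Chars.upper]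

theorem pv_contains_agree (w : String) :
    pvAbbrevsA.contains w = pvFA (i, w) := by
  rfl

-- a word in the abbreviation set is never "version"
theorem pv_fa_not_version {i : Int} {w : String} (h : pvFA (i, w) = true) :
    (w == "version") = false := by
  have : w ∈ ["nkjv", "kjv", "niv", "esv", "nasb", "nlt", "amp", "msg"] := by
    simpa [pvFA, pvAbbrevSetB, PySem.Set.mem_ofList] using h
  fin_cases this <;> decide

-- B's staged selection, as a function of the two search results
def pvSelect (words : List String) :
    Option (Int × String) → Option Int → Option String
  | some (_, w), none => some (PySem.Str.upper w)
  | some (a, w), some v =>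
      if a < v then some (PySem.Str.upper w)
      else some (PySem.Str.upper (PySem.List.pyGetD words (v - 1) ""))
  | none, some v => some (PySem.Str.upper (PySem.List.pyGetD words (v - 1) ""))
  | none, none => none

-- A's single interleaved scan equals B's two-search-then-compare selection
theorem pv_inner_select (words : List String) (ws : List String) : ∀ (k : Int),
    pvInnerA words (PySem.List.enumerate ws k) =
      pvSelect words (((PySem.List.enumerate ws k).filter pvFA).head?)
        ((((PySem.List.enumerate ws k).filter (pvFV words)).map Prod.fst).head?) := by
  induction ws with
  | nil => intro k; simp [pvInnerA, PySem.List.enumerate_nil, pvSelect]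
  | cons w rs ih =>
    intro k
    rw [PySem.List.enumerate_cons]
    -- every index in the tail is > k
    have htail : ∀ p ∈ (PySem.List.enumerate rs (k + 1)).filter (pvFV words), k < p.1 := by
      intro p hp
      have hp' := List.mem_of_mem_filter hp
      rcases (PySem.List.mem_enumerate_iff _ _ _).1 hp' with ⟨j, hj, rfl⟩
      omega
    simp only [pvInnerA]
    by_cases hA : pvFA (k, w) = true
    · have hv : pvFV words (k, w) = false := by
        simp [pvFV, pv_fa_not_version hA]
      rw [pv_contains_agree w (i := k), if_pos hA]
      rw [List.filter_cons_of_pos hA, List.filter_cons_of_neg (by simp [hv])]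
      cases hvh : ((PySem.List.enumerate rs (k + 1)).filter (pvFV words)).map Prod.fst with
      | nil => simp [pvSelect]
      | cons v vs =>
        have hvmem : ∃ p ∈ (PySem.List.enumerate rs (k + 1)).filter (pvFV words), p.1 = v := by
          rcases List.map_eq_cons_iff.1 hvh with ⟨p, ps, hpmem, hpv, _⟩
          exact ⟨p, by rw [hpmem]; exact List.mem_cons_self, hpv⟩
        rcases hvmem with ⟨p, hpmem, hpv⟩
        have : k < v := hpv ▸ htail p hpmem
        simp [pvSelect, this]
    · rw [pv_contains_agree w (i := k), if_neg hA]
      rw [List.filter_cons_of_neg (by simp [hA])]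
      by_cases hV : pvFV words (k, w) = true
      · have h1 : (w == "version" && decide (0 < k)) = true := by
          have := hV; simp only [pvFV, Bool.and_eq_true] at this; simp [this.1.1, this.1.2]
        have h2 : PySem.Str.len (PySem.Str.upper (PySem.List.pyGetD words (k - 1) "")) ≤ 5 := by
          have h' := hV; rw [pvFV, Bool.and_eq_true] at h'
          rw [pv_len_upper]
          exact of_decide_eq_true h'.2
        rw [if_pos h1]
        simp only [h2, if_pos]
        rw [List.filter_cons_of_pos hV]
        cases hah : ((PySem.List.enumerate rs (k + 1)).filter pvFA).head? with
        | none => simp [pvSelect]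
        | some p =>
          obtain ⟨a, w'⟩ := p
          have hamem : (a, w') ∈ (PySem.List.enumerate rs (k + 1)).filter pvFA :=
            List.mem_of_mem_head? hah
          have : k < a := by
            have := List.mem_of_mem_filter hamem
            rcases (PySem.List.mem_enumerate_iff _ _ _).1 this with ⟨j, hj, heq⟩
            have : a = k + 1 + (j : Int) := congrArg Prod.fst heq
            omega
          simp [pvSelect, not_lt.2 (le_of_lt this)]
      · have hsplit : (w == "version" && decide (0 < k)) = true →
            ¬ PySem.Str.len (PySem.Str.upper (PySem.List.pyGetD words (k - 1) "")) ≤ 5 := by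
          intro h1 h2
          apply hV
          rw [pvFV, Bool.and_eq_true]
          refine ⟨h1, decide_eq_true ?_⟩
          rwa [pv_len_upper] at h2
        rw [List.filter_cons_of_neg (by simp [hV])]
        by_cases h1 : (w == "version" && decide (0 < k)) = true
        · rw [if_pos h1, if_neg (hsplit h1)]
          exact ih (k + 1)
        · rw [if_neg h1]
          exact ih (k + 1)

-- A's outer loop is the any() guard around the (keyword-independent) scan.
theorem pv_outer_eq (tl : String) (kws : List String) :
    pvOuterA tl kws =
      if kws.any (fun kw => PySem.Str.isIn kw tl) then
        pvInnerA (PySem.Str.split₀ tl) (PySem.List.enumerate (PySem.Str.split₀ tl))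
      else none := by
  induction kws with
  | nil => simp [pvOuterA]
  | cons k ks ih =>
    unfold pvOuterA
    by_cases hk : PySem.Str.isIn k tl = true
    · simp only [hk, if_true, List.any_cons, Bool.true_or]
      cases hs : pvInnerA (PySem.Str.split₀ tl) (PySem.List.enumerate (PySem.Str.split₀ tl)) with
      | some r => simp
      | none => simp only [hs, ih]; split <;> rfl
    · simp only [hk, Bool.false_eq_true, if_false, List.any_cons]
      rw [ih]
      simp

-- ===== VERDICT (by name: the statement is the Claim_ definition above) =====
theorem detect_version_change_spec : Claim_equal_detect_version_change := by
  intro text _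
  unfold Spec_detect_version_change detect_version_change detect_version_change_alt
  rw [pv_outer_eq]
  by_cases hg : (["version", "translation", "bible"].any
      (fun kw => PySem.Str.isIn kw (PySem.Str.lower text))) = true
  · rw [if_pos hg, if_pos hg]
    rw [pv_inner_select (PySem.Str.split₀ (PySem.Str.lower text))
      (PySem.Str.split₀ (PySem.Str.lower text)) 0]
    rfl
  · rw [if_neg hg, if_neg hg]
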